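-- pv_equiv track=rewrite | github.com/cpintor/ITMD_413 | Assignment_13/cpintor_HW_13/question_2/password_checker.py | does_password_pass_check
-- ===== SOURCE A (Python) =====
-- def does_password_pass_check(password):
--     if len(password) == 0:
--         return False
--     elif password[0].isdigit():
--         return True
--     else:
--         password = password[1:]
--         return does_password_pass_check(password)
-- ===== SOURCE B (Python) =====
-- def does_password_pass_check(password):
--     found = False
--     for c in password:
--         if c.isdigit():
--             found = True
--     return found
-- ===== Notes on version B (the rewrite author's own statement) =====
-- stated objective: faster
-- what changed: Replaced the recursive slice-and-recurse scan with a single iterative pass that accumulates a boolean flag over the characters.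
import Mathlib
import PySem

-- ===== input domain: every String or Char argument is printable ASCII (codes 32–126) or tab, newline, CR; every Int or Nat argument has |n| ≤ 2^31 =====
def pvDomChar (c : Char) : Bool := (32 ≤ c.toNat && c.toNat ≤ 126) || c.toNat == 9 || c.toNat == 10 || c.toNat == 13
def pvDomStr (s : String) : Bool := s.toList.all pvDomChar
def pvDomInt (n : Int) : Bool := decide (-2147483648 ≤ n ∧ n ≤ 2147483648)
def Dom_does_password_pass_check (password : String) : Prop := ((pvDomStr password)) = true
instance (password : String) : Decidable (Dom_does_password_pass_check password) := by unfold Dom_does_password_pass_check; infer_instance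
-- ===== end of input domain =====

-- ===== PORT A =====
-- A: recursion — empty → False; head digit → True; else recurse on the tail slice
def pvARec : List Char → Bool
  | [] => false
  | c :: rest => if PySem.Chars.isdigit c then true else pvARec rest

def does_password_pass_check (password : String) : Bool :=
  pvARec password.toList

-- ===== PORT B =====
-- B: one iterative pass accumulating a boolean flag (no early exit, no slicing)
def does_password_pass_check_alt (password : String) : Bool :=
  password.toList.foldl (fun found c => if PySem.Chars.isdigit c then true else found) false

-- ===== PRECONDITION & SPEC =====
def Spec_does_password_pass_check (password : String) (out : Bool) : Prop := out = does_password_pass_check_alt password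
instance (password : String) (out : Bool) : Decidable (Spec_does_password_pass_check password out) := by unfold Spec_does_password_pass_check; infer_instance

-- ===== CLAIM (what is proved, stated in full; the proofs are below) =====
def Claim_equal_does_password_pass_check : Prop := ∀ (password : String), Dom_does_password_pass_check password → Spec_does_password_pass_check password (does_password_pass_check password)

-- ===== LEMMAS AND PROOFS =====

-- ===== VERDICT (by name: the statement is the Claim_ definition above) =====
theorem pvFoldl_true (l : List Char) :
    l.foldl (fun found c => PySem.Chars.isdigit c || found) true = true := by
  induction l with
  | nil => rfl
  | cons c rest ih => simp [List.foldl, ih]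

theorem pvARec_eq_foldl (l : List Char) :
    pvARec l = l.foldl (fun found c => if PySem.Chars.isdigit c then true else found) false := by
  induction l with
  | nil => rfl
  | cons c rest ih =>
    by_cases h : PySem.Chars.isdigit c = true
    · simp [pvARec, List.foldl, h, pvFoldl_true]
    · simp [pvARec, List.foldl, h, ih]

theorem does_password_pass_check_spec : Claim_equal_does_password_pass_check := by
  intro password _
  unfold Spec_does_password_pass_check does_password_pass_check does_password_pass_check_alt
  exact pvARec_eq_foldl password.toList
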